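-- pv_equiv track=rewrite | github.com/lza6/claw-code-tingfeng | src/tools_runtime/code_edit/patch_coder.py | get_error_hint
-- ===== SOURCE A (Python) =====
-- def get_error_hint(search: str, content: str) -> str | None:
--     """生成错误提示"""
--     search_lines = search.splitlines()
--     content_lines = content.splitlines()
--
--     # 找到最相似的行
--     similar = []
--     for _i, search_line in enumerate(search_lines[:5]):
--         for j, content_line in enumerate(content_lines):
--             if search_line.strip() == content_line.strip():
--                 similar.append(f"行 {j+1}: {content_line[:60]}")
--                 break
--
--     if similar:
--         return "可能的匹配位置:\n" + "\n".join(similar[:3])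
--     return None
-- ===== SOURCE B (Python) =====
-- def get_error_hint(search: str, content: str) -> str | None:
--     """生成错误提示"""
--     # Index each stripped content line to its first-occurrence hint, built in one pass.
--     index = {}
--     for j, line in enumerate(content.splitlines()):
--         key = line.strip()
--         if key not in index:
--             index[key] = f"行 {j+1}: {line[:60]}"
--     keys = (sl.strip() for sl in search.splitlines()[:5])
--     similar = [index[k] for k in keys if k in index]
--     if similar:
--         return "可能的匹配位置:\n" + "\n".join(similar[:3])
--     return None
-- ===== Notes on version B (the rewrite author's own statement) =====
-- stated objective: alternative
-- what changed: Replaces A's per-search-line linear scan of content_lines (with break) by a first-occurrence dict index over stripped content lines built in one pass, each search line then being one lookup.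
import Mathlib
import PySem

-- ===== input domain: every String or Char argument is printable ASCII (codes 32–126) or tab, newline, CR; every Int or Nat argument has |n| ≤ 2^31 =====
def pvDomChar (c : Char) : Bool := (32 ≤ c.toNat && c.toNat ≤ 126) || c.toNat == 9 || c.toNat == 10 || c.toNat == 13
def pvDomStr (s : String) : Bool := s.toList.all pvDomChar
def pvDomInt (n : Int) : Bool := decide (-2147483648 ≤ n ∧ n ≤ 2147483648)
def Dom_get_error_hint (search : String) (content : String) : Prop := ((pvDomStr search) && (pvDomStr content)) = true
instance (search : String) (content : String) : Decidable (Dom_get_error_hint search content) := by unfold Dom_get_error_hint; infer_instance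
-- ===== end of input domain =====

-- B replaces A's per-search-line scan of content_lines by a first-occurrence dict index built once.

-- ===== PORT A =====
-- A's inner 'for j, content_line in enumerate(content_lines): if …: similar.append(…); break'
-- threading the similar-accumulator; the append happens at the break point
def pvInnerA (searchLine : String) (acc : List String) : List (Int × String) → List String
  | [] => acc
  | (j, cl) :: rest =>
    if PySem.Str.strip searchLine = PySem.Str.strip cl then
      acc ++ ["行 " ++ PySem.Int.toStr (j + 1) ++ ": " ++ PySem.Str.slice cl none (some 60)]
    else pvInnerA searchLine acc rest

def get_error_hint (search : String) (content : String) : Option String :=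
  let searchLines := PySem.Str.splitlines search
  let contentLines := PySem.Str.splitlines content
  let similar := (PySem.List.slice searchLines none (some 5)).foldl
    (fun acc searchLine => pvInnerA searchLine acc (PySem.List.enumerate contentLines 0)) []
  if similar ≠ [] then
    some ("可能的匹配位置:\n" ++ PySem.Str.join "\n" (PySem.List.slice similar none (some 3)))
  else none

-- ===== PORT B =====
-- one pass over enumerate(content.splitlines()): insert a key only the first time it appears
def pvBuildIndex : List (Int × String) → PySem.Dict String String → PySem.Dict String String
  | [], d => d
  | (j, cl) :: rest, d =>
    let key := PySem.Str.strip cl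
    pvBuildIndex rest
      (if d.contains key then d
       else d.insert key ("行 " ++ PySem.Int.toStr (j + 1) ++ ": " ++ PySem.Str.slice cl none (some 60)))

def get_error_hint_alt (search : String) (content : String) : Option String :=
  let idx := pvBuildIndex (PySem.List.enumerate (PySem.Str.splitlines content) 0) PySem.Dict.empty
  let similar := (PySem.List.slice (PySem.Str.splitlines search) none (some 5)).filterMap
    (fun sl => idx.get? (PySem.Str.strip sl))
  if similar ≠ [] then
    some ("可能的匹配位置:\n" ++ PySem.Str.join "\n" (similar.take 3))
  else none

-- ===== PRECONDITION & SPEC =====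
def Spec_get_error_hint (search : String) (content : String) (out : Option String) : Prop := out = get_error_hint_alt search content
instance (search : String) (content : String) (out : Option String) : Decidable (Spec_get_error_hint search content out) := by unfold Spec_get_error_hint; infer_instance

-- ===== CLAIM (what is proved, stated in full; the proofs are below) =====
def Claim_equal_get_error_hint : Prop := ∀ (search : String) (content : String), Dom_get_error_hint search content → Spec_get_error_hint search content (get_error_hint search content)

-- ===== LEMMAS AND PROOFS =====

-- proof-side view of A's inner scan: the first matching hint, if any
def pvScan (sl : String) : List (Int × String) → Option String
  | [] => none
  | (j, cl) :: rest =>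
    if PySem.Str.strip sl = PySem.Str.strip cl then
      some ("行 " ++ PySem.Int.toStr (j + 1) ++ ": " ++ PySem.Str.slice cl none (some 60))
    else pvScan sl rest

lemma pvInnerA_eq_scan (sl : String) (acc : List String) (pairs : List (Int × String)) :
    pvInnerA sl acc pairs = acc ++ (pvScan sl pairs).toList := by
  induction pairs generalizing acc with
  | nil => simp [pvInnerA, pvScan]
  | cons p rest ih =>
    obtain ⟨j, cl⟩ := p
    simp only [pvInnerA, pvScan]
    by_cases hk : PySem.Str.strip sl = PySem.Str.strip cl
    · simp [hk]
    · simp [hk, ih]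

-- A's outer loop collects exactly the scan results
lemma loopA (e : List (Int × String)) (xs : List String) (acc : List String) :
    xs.foldl (fun acc searchLine => pvInnerA searchLine acc e) acc
      = acc ++ xs.filterMap (fun sl => pvScan sl e) := by
  induction xs generalizing acc with
  | nil => simp
  | cons x rest ih =>
    simp only [List.foldl_cons, List.filterMap_cons]
    rw [pvInnerA_eq_scan, ih]
    cases h : pvScan x e <;> simp

-- looking up a stripped search line in the first-occurrence index is exactly A's first-match scan
lemma get?_pvBuildIndex (sl : String) (pairs : List (Int × String)) (d : PySem.Dict String String) :
    (pvBuildIndex pairs d).get? (PySem.Str.strip sl) =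
      ((d.get? (PySem.Str.strip sl)).or (pvScan sl pairs)) := by
  induction pairs generalizing d with
  | nil => simp [pvBuildIndex, pvScan]
  | cons p rest ih =>
    obtain ⟨j, cl⟩ := p
    simp only [pvBuildIndex, pvScan]
    by_cases hc : d.contains (PySem.Str.strip cl)
    · rw [if_pos hc, ih]
      by_cases hk : PySem.Str.strip sl = PySem.Str.strip cl
      · rw [if_pos hk]
        have hs : (d.get? (PySem.Str.strip sl)).isSome := by
          rw [PySem.Dict.contains_eq_isSome_get?] at hc
          rw [hk]; exact hc
        cases h : d.get? (PySem.Str.strip sl) with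
        | none => rw [h] at hs; simp at hs
        | some v => simp
      · rw [if_neg hk]
    · rw [if_neg hc, ih]
      by_cases hk : PySem.Str.strip sl = PySem.Str.strip cl
      · rw [if_pos hk, hk, PySem.Dict.get?_insert_self]
        have hn : d.get? (PySem.Str.strip cl) = none := by
          rw [PySem.Dict.contains_eq_isSome_get?] at hc
          simpa using hc
        rw [hn]; rfl
      · rw [if_neg hk, PySem.Dict.get?_insert_of_ne _ _ hk]

lemma take_eq_slice3 (xs : List String) :
    PySem.List.slice xs none (some 3) = xs.take 3 := by
  have : ((3 : Nat) : Int) = (3 : Int) := by norm_num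
  rw [← this, PySem.List.slice_to_natCast]

-- ===== VERDICT (by name: the statement is the Claim_ definition above) =====
theorem get_error_hint_spec : Claim_equal_get_error_hint := by
  intro search content _
  unfold Spec_get_error_hint get_error_hint get_error_hint_alt
  simp only
  rw [loopA, List.nil_append, take_eq_slice3]
  have h2 : List.filterMap
      (fun sl => pvScan sl (PySem.List.enumerate (PySem.Str.splitlines content) 0))
      (PySem.List.slice (PySem.Str.splitlines search) none (some 5))
    = List.filterMap
      (fun sl => (pvBuildIndex (PySem.List.enumerate (PySem.Str.splitlines content) 0)
          PySem.Dict.empty).get? (PySem.Str.strip sl))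
      (PySem.List.slice (PySem.Str.splitlines search) none (some 5)) := by
    apply List.filterMap_congr
    intro sl _
    rw [get?_pvBuildIndex]
    simp
  rw [h2]
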